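-- pv_equiv track=rewrite | github.com/yhcath/CompLing-FInal | sentiment_analysis.py | build_trigram2_features
-- ===== SOURCE A (Python) =====
-- def build_trigram2_features(token_list_list, feature_list):
--     result = []
--
--     for token_list in token_list_list:
--         feature_row = [0]*len(feature_list)
--         for i in range(len(token_list) - 2):
--             token_one = token_list[i]
--             token_two = token_list[i+1]
--             token_three = token_list[i+2]
--             trigram = f"{token_one} {token_two} {token_three}"
--
--             if trigram not in feature_list:
--                 # Shouldn't happen for the training set, but might happen for the testing set
--                 continue
--             else:
--                 feature_row[feature_list.index(trigram)] += 1
--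
--         result.append(feature_row)
--
--     return result
-- ===== SOURCE B (Python) =====
-- def build_trigram2_features(token_list_list, feature_list):
--     # One pass over feature_list builds a first-occurrence index (matches list.index
--     # semantics on duplicates); per row, count trigrams in a dict, then one pass over
--     # the features emits each row -- no per-trigram scan of feature_list.
--     first = {}
--     for j, f in enumerate(feature_list):
--         first.setdefault(f, j)
--     result = []
--     for token_list in token_list_list:
--         counts = {}
--         for i in range(len(token_list) - 2):
--             tri = f"{token_list[i]} {token_list[i+1]} {token_list[i+2]}"
--             counts[tri] = counts.get(tri, 0) + 1
--         row = [counts.get(f, 0) if first[f] == j else 0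
--                for j, f in enumerate(feature_list)]
--         result.append(row)
--     return result
-- ===== Notes on version B (the rewrite author's own statement) =====
-- stated objective: faster
-- what changed: Replaces the per-trigram membership scan and list.index over feature_list with a precomputed first-occurrence index dict plus a per-row trigram count dict, emitting each row in a single pass over the features.
import Mathlib
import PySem

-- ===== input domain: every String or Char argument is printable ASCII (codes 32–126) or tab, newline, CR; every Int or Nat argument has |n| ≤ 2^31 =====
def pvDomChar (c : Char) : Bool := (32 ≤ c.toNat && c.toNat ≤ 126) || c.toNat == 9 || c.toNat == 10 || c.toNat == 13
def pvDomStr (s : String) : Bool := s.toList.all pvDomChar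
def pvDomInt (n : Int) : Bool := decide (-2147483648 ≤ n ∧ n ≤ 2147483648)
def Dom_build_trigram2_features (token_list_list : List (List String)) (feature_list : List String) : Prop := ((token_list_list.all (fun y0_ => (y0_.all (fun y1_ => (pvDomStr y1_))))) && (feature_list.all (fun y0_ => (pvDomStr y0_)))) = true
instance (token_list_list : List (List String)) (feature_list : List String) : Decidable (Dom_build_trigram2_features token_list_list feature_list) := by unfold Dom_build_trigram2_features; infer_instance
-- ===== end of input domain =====

-- B replaces A's per-trigram scans of feature_list (membership test + list.index) by a
-- first-occurrence index dict and a per-row trigram count dict; a timing run measures the speed claim.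

-- ===== PORT A =====
def build_trigram2_features (token_list_list : List (List String)) (feature_list : List String) : List (List Int) :=
  token_list_list.foldl (fun result token_list =>
    let feature_row :=
      (PySem.List.pyRange 0 ((token_list.length : Int) - 2) 1).foldl (fun feature_row i =>
        -- indices i, i+1, i+2 are always in range, so the pyGetD default is never used
        let token_one := PySem.List.pyGetD token_list i ""
        let token_two := PySem.List.pyGetD token_list (i + 1) ""
        let token_three := PySem.List.pyGetD token_list (i + 2) ""
        let trigram := token_one ++ " " ++ token_two ++ " " ++ token_three
        if trigram ∉ feature_list then feature_row
        else
          match PySem.List.index? feature_list trigram with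
          | some idx => feature_row.set idx (feature_row.getD idx 0 + 1)
          | none => feature_row)
        (List.replicate feature_list.length (0:Int))
    result ++ [feature_row]) []

-- ===== PORT B =====
def build_trigram2_features_alt (token_list_list : List (List String)) (feature_list : List String) : List (List Int) :=
  let first := (PySem.List.enumerate feature_list).foldl
    (fun d p => d.setdefault p.2 p.1) PySem.Dict.empty
  token_list_list.foldl (fun result token_list =>
    let counts :=
      (PySem.List.pyRange 0 ((token_list.length : Int) - 2) 1).foldl (fun d i =>
        let tri := PySem.List.pyGetD token_list i "" ++ " " ++
                   PySem.List.pyGetD token_list (i + 1) "" ++ " " ++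
                   PySem.List.pyGetD token_list (i + 2) ""
        d.insert tri (d.getD tri 0 + 1)) PySem.Dict.empty
    -- first[f] always exists (f ∈ feature_list), so the getD default -1 is never used
    let row := (PySem.List.enumerate feature_list).map (fun p =>
      if (first.get? p.2).getD (-1) = p.1 then counts.getD p.2 0 else 0)
    result ++ [row]) []

-- ===== PRECONDITION & SPEC =====
def Spec_build_trigram2_features (token_list_list : List (List String)) (feature_list : List String) (out : List (List Int)) : Prop := out = build_trigram2_features_alt token_list_list feature_list
instance (token_list_list : List (List String)) (feature_list : List String) (out : List (List Int)) : Decidable (Spec_build_trigram2_features token_list_list feature_list out) := by unfold Spec_build_trigram2_features; infer_instance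

-- ===== CLAIM (what is proved, stated in full; the proofs are below) =====
def Claim_equal_build_trigram2_features : Prop := ∀ (token_list_list : List (List String)) (feature_list : List String), Dom_build_trigram2_features token_list_list feature_list → Spec_build_trigram2_features token_list_list feature_list (build_trigram2_features token_list_list feature_list)

-- ===== LEMMAS AND PROOFS =====

-- collect-rows loops as map
theorem pvFoldlAppendSingleton {α β : Type} (l : List α) (f : α → List β) (init : List (List β)) :
    l.foldl (fun r x => r ++ [f x]) init = init ++ l.map f := by
  induction l generalizing init with
  | nil => simp
  | cons x xs ih => simp [List.foldl_cons, ih]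

-- the trigram string built at index i
def pvTri (tl : List String) (i : Int) : String :=
  PySem.List.pyGetD tl i "" ++ " " ++ PySem.List.pyGetD tl (i + 1) "" ++ " " ++
    PySem.List.pyGetD tl (i + 2) ""

def pvTris (tl : List String) : List String :=
  (PySem.List.pyRange 0 ((tl.length : Int) - 2) 1).map (pvTri tl)

-- A's inner-loop step, as a function of the trigram string
def pvStepA (fl : List String) (row : List Int) (t : String) : List Int :=
  if t ∉ fl then row
  else
    match PySem.List.index? fl t with
    | some idx => row.set idx (row.getD idx 0 + 1)
    | none => row

theorem pvLenA (fl : List String) (ts : List String) (r : List Int) :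
    (ts.foldl (pvStepA fl) r).length = r.length := by
  induction ts generalizing r with
  | nil => rfl
  | cons t ts ih =>
    rw [List.foldl_cons, ih]
    unfold pvStepA
    split
    · rfl
    · rcases PySem.List.index? fl t with _ | idx <;> simp

theorem pvGetDSet (r : List Int) (i j : Nat) (hi : i < r.length) (v : Int) :
    (r.set i v).getD j 0 = if i = j then v else r.getD j 0 := by
  by_cases hij : i = j
  · subst hij
    simp [List.getD_eq_getElem?_getD, hi]
  · simp [List.getD_eq_getElem?_getD, hij]

theorem pvGetA (fl : List String) (ts : List String) (r : List Int)
    (hr : r.length = fl.length) (j : Nat) (hj : j < fl.length) :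
    (ts.foldl (pvStepA fl) r).getD j 0
      = r.getD j 0 + (ts.countP (fun t => PySem.List.index? fl t == some j) : Int) := by
  induction ts generalizing r with
  | nil => simp
  | cons t ts ih =>
    rw [List.foldl_cons, List.countP_cons]
    by_cases hm : t ∈ fl
    · rcases hidx : PySem.List.index? fl t with _ | idx
      · exact absurd ((PySem.List.index?_eq_none_iff fl t).mp hidx) (by simpa using hm)
      · have hlt : idx < fl.length := (PySem.List.getElem_of_index?_eq_some hidx).1
        have hstep : pvStepA fl r t = r.set idx (r.getD idx 0 + 1) := by
          unfold pvStepA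
          rw [if_neg (show ¬ t ∉ fl by simp [hm]), hidx]
        rw [hstep, ih _ (by simp [hr]), pvGetDSet r idx j (by omega)]
        by_cases hij : idx = j
        · subst hij
          rw [if_pos rfl, if_pos (show (some idx == some idx) = true by simp)]
          push_cast
          ring
        · rw [if_neg hij, if_neg (show ¬ ((some idx == some j) = true) by simp [hij])]
          push_cast
          ring
    · have hnone : PySem.List.index? fl t = none := (PySem.List.index?_eq_none_iff fl t).mpr hm
      have hstep : pvStepA fl r t = r := by
        unfold pvStepA
        rw [if_pos hm]
      rw [hstep, ih _ hr, hnone]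
      simp

-- per-position count: only the first occurrence of fl[j] contributes
theorem pvCountPEq (fl : List String) (ts : List String) (j : Nat) (hj : j < fl.length) :
    ts.countP (fun t => PySem.List.index? fl t == some j)
      = if PySem.List.index? fl (fl[j]'hj) = some j then ts.count (fl[j]'hj) else 0 := by
  by_cases h : PySem.List.index? fl (fl[j]'hj) = some j
  · rw [if_pos h, List.count_eq_countP]
    apply List.countP_congr
    intro t _
    constructor
    · intro ht
      have ht' : PySem.List.index? fl t = some j := eq_of_beq ht
      obtain ⟨hk, hget, -⟩ := PySem.List.getElem_of_index?_eq_some ht'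
      exact beq_iff_eq.mpr hget.symm
    · intro ht
      have ht' : t = fl[j]'hj := eq_of_beq ht
      exact beq_iff_eq.mpr (by rw [ht']; exact h)
  · rw [if_neg h]
    apply List.countP_eq_zero.mpr
    intro t _ ht
    have ht' : PySem.List.index? fl t = some j := eq_of_beq ht
    obtain ⟨hk, hget, -⟩ := PySem.List.getElem_of_index?_eq_some ht'
    exact h (by rw [hget]; exact ht')

-- the first-occurrence dict built by setdefault over enumerate
theorem pvGetFirst (l : List String) (s : Int) (d : PySem.Dict String Int) (f : String) :
    ((PySem.List.enumerate l s).foldl (fun d p => d.setdefault p.2 p.1) d).get? f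
      = (d.get? f).or (Option.map (fun k : Nat => s + (k : Int)) (PySem.List.index? l f)) := by
  induction l generalizing s d with
  | nil => simp [PySem.List.enumerate_nil, PySem.List.index?_eq_idxOf?]
  | cons x xs ih =>
    rw [PySem.List.enumerate_cons, List.foldl_cons]
    dsimp only
    rw [ih]
    by_cases hx : x = f
    · subst hx
      rw [PySem.Dict.get?_setdefault_self, PySem.List.index?_cons_self]
      rcases hd : d.get? x with _ | v <;> simp
    · rw [PySem.Dict.get?_setdefault_of_ne d s (Ne.symm hx),
          PySem.List.index?_cons_of_ne xs hx]
      rcases h2 : PySem.List.index? xs f with _ | k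
      · simp
      · simp only [Option.map_some]
        have heq : s + 1 + (k : Int) = s + ((k + 1 : Nat) : Int) := by push_cast; ring
        rw [heq]

-- one row: A's in-place increments equal B's per-feature emission
theorem pvRowEq (fl : List String) (tl : List String) :
    (PySem.List.pyRange 0 ((tl.length : Int) - 2) 1).foldl (fun feature_row i =>
        let token_one := PySem.List.pyGetD tl i ""
        let token_two := PySem.List.pyGetD tl (i + 1) ""
        let token_three := PySem.List.pyGetD tl (i + 2) ""
        let trigram := token_one ++ " " ++ token_two ++ " " ++ token_three
        if trigram ∉ fl then feature_row
        else
          match PySem.List.index? fl trigram with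
          | some idx => feature_row.set idx (feature_row.getD idx 0 + 1)
          | none => feature_row)
      (List.replicate fl.length (0:Int))
    = (PySem.List.enumerate fl).map (fun p =>
        if ((((PySem.List.enumerate fl).foldl
              (fun d p => d.setdefault p.2 p.1) PySem.Dict.empty).get? p.2).getD (-1)) = p.1
        then ((PySem.List.pyRange 0 ((tl.length : Int) - 2) 1).foldl (fun d i =>
            let tri := PySem.List.pyGetD tl i "" ++ " " ++
                       PySem.List.pyGetD tl (i + 1) "" ++ " " ++
                       PySem.List.pyGetD tl (i + 2) ""
            d.insert tri (d.getD tri 0 + 1)) PySem.Dict.empty).getD p.2 0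
        else 0) := by
  have hA : (PySem.List.pyRange 0 ((tl.length : Int) - 2) 1).foldl (fun feature_row i =>
        let token_one := PySem.List.pyGetD tl i ""
        let token_two := PySem.List.pyGetD tl (i + 1) ""
        let token_three := PySem.List.pyGetD tl (i + 2) ""
        let trigram := token_one ++ " " ++ token_two ++ " " ++ token_three
        if trigram ∉ fl then feature_row
        else
          match PySem.List.index? fl trigram with
          | some idx => feature_row.set idx (feature_row.getD idx 0 + 1)
          | none => feature_row)
      (List.replicate fl.length (0:Int))
      = (pvTris tl).foldl (pvStepA fl) (List.replicate fl.length (0:Int)) := by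
    rw [pvTris, List.foldl_map]
    rfl
  have hC : (PySem.List.pyRange 0 ((tl.length : Int) - 2) 1).foldl (fun d i =>
        let tri := PySem.List.pyGetD tl i "" ++ " " ++
                   PySem.List.pyGetD tl (i + 1) "" ++ " " ++
                   PySem.List.pyGetD tl (i + 2) ""
        d.insert tri (d.getD tri 0 + 1)) PySem.Dict.empty
      = PySem.Dict.counter (pvTris tl) := by
    rw [pvTris, ← PySem.Dict.foldl_insert_getD_add_one_eq_counter, List.foldl_map]
    rfl
  rw [hA]
  simp only [hC]
  apply List.ext_getElem
  · rw [pvLenA]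
    simp [PySem.List.length_enumerate]
  · intro j hj1 hj2
    have hjf : j < fl.length := by
      rw [pvLenA] at hj1
      simpa using hj1
    rw [← List.getD_eq_getElem _ 0 hj1,
        pvGetA fl (pvTris tl) _ (by simp) j hjf,
        List.getElem_map, PySem.List.getElem_enumerate,
        pvGetFirst fl 0 PySem.Dict.empty,
        pvCountPEq fl _ j hjf]
    rw [List.getD_replicate _ hjf]
    simp only [PySem.Dict.get?_empty, Option.none_or, zero_add]
    rcases hidx : PySem.List.index? fl (fl[j]'hjf) with _ | k
    · exact absurd ((PySem.List.index?_eq_none_iff fl _).mp hidx) (by simp)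
    · simp only [Option.map_some, Option.getD_some]
      by_cases hkj : k = j
      · subst hkj
        rw [if_pos rfl, if_pos rfl, PySem.Dict.getD_counter]
      · rw [if_neg (by simp [hkj] : ¬ (some k = some j)),
            if_neg (show ¬ ((k : Int) = (j : Int)) by exact_mod_cast hkj)]
        simp

-- ===== VERDICT (by name: the statement is the Claim_ definition above) =====
theorem build_trigram2_features_spec : Claim_equal_build_trigram2_features := by
  intro tll fl _
  show build_trigram2_features tll fl = build_trigram2_features_alt tll fl
  unfold build_trigram2_features build_trigram2_features_alt
  rw [pvFoldlAppendSingleton, pvFoldlAppendSingleton]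
  simp only [List.nil_append]
  apply List.map_congr_left
  intro tl _
  exact pvRowEq fl tl
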